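-- pv_equiv track=rewrite | github.com/GeirOwe/adventOfCode | day6_2_2025.py | process_the_data
-- ===== SOURCE A (Python) =====
-- def process_the_data(theData):
--     """
--     Parse the worksheet for part 2: numbers are read vertically (top to bottom)
--     in each column, and problems are read right-to-left.
--     Each column represents one digit position.
--     """
--     if not theData or len(theData) < 2:
--         return 0
--
--     # Separate data lines from operator line (keep original, don't strip)
--     operator_line = theData[-1]
--     data_lines = theData[:-1]
--     max_col = len(operator_line)
--
--     # First, find all problem boundaries (columns where ALL rows including operator line have spaces)
--     # A separator is a column where all rows (data + operator) are spaces
--     separator_cols = []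
--     for c in range(max_col):
--         # Check if this column is all spaces in ALL rows (data + operator)
--         all_spaces = True
--         # Check data lines
--         for row in data_lines:
--             if c >= len(row) or row[c] != ' ':
--                 all_spaces = False
--                 break
--         # Check operator line
--         if all_spaces and (c >= len(operator_line) or operator_line[c] != ' '):
--             all_spaces = False
--
--         if all_spaces:
--             separator_cols.append(c)
--
--     # Find all operators and their positions
--     operators = []
--     for c in range(max_col):
--         if c < len(operator_line) and operator_line[c] in ['+', '*']:
--             operators.append((c, operator_line[c]))
--
--     # Process problems from right to left
--     problems = []
--
--     # Group operators by problem (between separators)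
--     # Find problem boundaries: separators divide problems
--     # Problems are between separators (or start/end)
--     problem_boundaries = sorted(separator_cols)
--     problem_boundaries.insert(0, -1)  # Add start (before first column)
--     problem_boundaries.append(max_col)  # Add end
--
--     # Process each problem from right to left
--     for op_col, op_char in reversed(operators):
--         # Find which problem this operator belongs to
--         # Problem is from after previous separator to before next separator
--         problem_start = 0
--         problem_end = max_col
--
--         for i in range(1, len(problem_boundaries)):
--             if problem_boundaries[i] > op_col:
--                 problem_end = problem_boundaries[i]  # End at separator (exclusive)
--                 problem_start = problem_boundaries[i - 1] + 1  # Start after previous separator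
--                 break
--
--         # Get columns in this problem (from right to left)
--         problem_cols = list(range(problem_end - 1, problem_start - 1, -1))
--         problem_cols.reverse()  # Now left to right
--
--         # Read numbers from this problem (right to left)
--         # Each column represents one number - read all digits from top to bottom
--         numbers = []
--
--         for pc in reversed(problem_cols):  # Process right to left
--             # Read all digits from this column (top to bottom)
--             column_digits = []
--             for row in data_lines:
--                 if pc < len(row) and row[pc].isdigit():
--                     column_digits.append(row[pc])
--
--             # If this column has digits, it's a number
--             if column_digits:
--                 number_str = ''.join(column_digits)
--                 if number_str:
--                     numbers.append(int(number_str))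
--
--         # Calculate result for this problem
--         if numbers and op_char:
--             if op_char == '+':
--                 result = sum(numbers)
--             elif op_char == '*':
--                 result = 1
--                 for n in numbers:
--                     result *= n
--             else:
--                 result = 0
--
--             problems.append(result)
--
--     # Return grand total
--     return sum(problems)
-- ===== SOURCE B (Python) =====
-- def process_the_data(theData):
--     # Alternative: for each operator column, find its problem's boundaries by
--     # expanding left/right from the operator until a separator column (all-space
--     # in every data row and the operator line) or the edge; no global separator
--     # list, no sort, no right-to-left pass.
--     if not theData or len(theData) < 2:
--         return 0
--     op_line = theData[-1]
--     rows = theData[:-1]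
--     n = len(op_line)
--
--     def is_sep(c):
--         return all(c < len(r) and r[c] == ' ' for r in rows) and op_line[c] == ' '
--
--     total = 0
--     for c in range(n):
--         ch = op_line[c]
--         if ch != '+' and ch != '*':
--             continue
--         lo = c
--         while lo > 0 and not is_sep(lo - 1):
--             lo -= 1
--         hi = c + 1
--         while hi < n and not is_sep(hi):
--             hi += 1
--         nums = []
--         for pc in range(lo, hi):
--             ds = ''.join(r[pc] for r in rows if pc < len(r) and r[pc].isdigit())
--             if ds:
--                 nums.append(int(ds))
--         if nums:
--             if ch == '+':
--                 total += sum(nums)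
--             else:
--                 p = 1
--                 for v in nums:
--                     p *= v
--                 total += p
--     return total
-- ===== Notes on version B (the rewrite author's own statement) =====
-- stated objective: simpler
-- what changed: A builds a global sorted separator-column list with sentinel boundaries and, iterating the collected operators right-to-left, searches that list for each operator's problem bounds and reads the numbers right-to-left; B does one left-to-right pass over the operator-line columns and, at each operator, expands locally left/right to the enclosing separator columns and reads the numbers left-to-right.
import Mathlib
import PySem

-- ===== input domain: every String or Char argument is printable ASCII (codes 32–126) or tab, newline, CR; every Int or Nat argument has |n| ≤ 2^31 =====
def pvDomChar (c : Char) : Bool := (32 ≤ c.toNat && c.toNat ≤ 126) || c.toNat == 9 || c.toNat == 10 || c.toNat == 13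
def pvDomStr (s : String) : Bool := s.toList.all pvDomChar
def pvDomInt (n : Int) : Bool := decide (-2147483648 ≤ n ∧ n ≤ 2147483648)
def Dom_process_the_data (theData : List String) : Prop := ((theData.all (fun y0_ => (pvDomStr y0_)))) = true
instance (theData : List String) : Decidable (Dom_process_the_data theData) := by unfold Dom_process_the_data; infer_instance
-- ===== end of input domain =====

-- B replaces A's global sorted-separator-boundary search by a per-operator local
-- expansion to the enclosing separator columns (objective: simpler, same cost class).


-- ===== PORT A =====
-- shared digit-column reader: both Pythons read a column's digits top-to-bottom and
-- int() the joined string (none when the column has no digits).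
-- Char.isDigit is exact for str.isdigit on the ASCII domain.
def pvColNum (rows : List String) (pc : Int) : Option Int :=
  let ds := rows.filterMap (fun r =>
    match PySem.Str.pyGet? r pc with
    | some ch => if ch.isDigit then some ch else none
    | none => none)
  if ds = [] then none
  else PySem.Int.ofChars? ds   -- int(number_str); always `some` on a nonempty digit string

-- the loop body 'if this column has digits: numbers.append(int(...))' (same in both Pythons)
def pvAppendCol (rows : List String) (ns : List Int) (pc : Int) : List Int :=
  match pvColNum rows pc with
  | some v => ns ++ [v]
  | none => ns

-- the all-spaces-column test (A's inline loop over data lines plus operator-line check;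
-- B's is_sep helper): `c < len(r) and r[c] == ' '` is `pyGet? r c = some ' '` for c ≥ 0.
def pvIsSep (rows : List String) (opl : String) (c : Int) : Bool :=
  (rows.all fun r =>
    match PySem.Str.pyGet? r c with
    | some ch => ch == ' '
    | none => false) &&
  (match PySem.Str.pyGet? opl c with
    | some ch => ch == ' '
    | none => false)

-- A's operator-collecting loop body: if operator_line[c] in ['+','*']: append (c, char)
def pvAppendOp (opl : String) (acc : List (Int × Char)) (c : Int) : List (Int × Char) :=
  match PySem.Str.pyGet? opl c with
  | some ch => if ch == '+' || ch == '*' then acc ++ [(c, ch)] else acc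
  | none => acc

-- A's inner boundary-search loop: for i in 1..len-1, first boundaries[i] > op_col
def pvFindBounds (oc maxCol : Int) : Int → List Int → Int × Int
  | _, [] => (0, maxCol)
  | prev, b :: rest => if oc < b then (prev + 1, b) else pvFindBounds oc maxCol b rest

-- A's per-operator loop body (boundary lookup, right-to-left number read, result append)
def pvProbStep (rows : List String) (maxCol : Int) (boundaries : List Int)
    (acc : List Int) (p : Int × Char) : List Int :=
  let se := match boundaries with
    | [] => ((0 : Int), maxCol)
    | b :: rest => pvFindBounds p.1 maxCol b rest
  let cols := (PySem.List.pyRange (se.2 - 1) (se.1 - 1) (-1)).reverse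
  let numbers := cols.reverse.foldl (pvAppendCol rows) ([] : List Int)
  if numbers = [] then acc
  else acc ++ [if p.2 == '+' then numbers.sum
               else if p.2 == '*' then numbers.foldl (· * ·) 1
               else 0]

def process_the_data (theData : List String) : Int :=
  if theData = [] ∨ theData.length < 2 then 0
  else
    match PySem.List.pyGet? theData (-1) with
    | none => 0   -- unreachable: theData ≠ []
    | some opl =>
      let rows := PySem.List.slice theData none (some (-1))
      let maxCol : Int := PySem.Str.len opl
      let sepCols := (PySem.List.pyRange 0 maxCol).filter (fun c => pvIsSep rows opl c)
      let ops := (PySem.List.pyRange 0 maxCol).foldl (pvAppendOp opl) []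
      let boundaries := (-1) :: (PySem.List.sorted sepCols (fun x => x) ++ [maxCol])
      let problems := ops.reverse.foldl (pvProbStep rows maxCol boundaries) []
      problems.sum

-- ===== PORT B =====
-- while lo > 0 and not is_sep(lo-1): lo -= 1
def pvScanLo (rows : List String) (opl : String) (lo : Int) : Int :=
  if h : 0 < lo ∧ pvIsSep rows opl (lo - 1) = false then pvScanLo rows opl (lo - 1) else lo
termination_by lo.toNat
decreasing_by omega

-- while hi < n and not is_sep(hi): hi += 1
def pvScanHi (rows : List String) (opl : String) (n hi : Int) : Int :=
  if h : hi < n ∧ pvIsSep rows opl hi = false then pvScanHi rows opl n (hi + 1) else hi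
termination_by (n - hi).toNat
decreasing_by omega

-- B's per-column loop body: skip non-operator columns, else expand to the enclosing
-- separators, read the numbers left-to-right, add the problem's result
def pvColStep (rows : List String) (opl : String) (n : Int) (total : Int) (c : Int) : Int :=
  match PySem.Str.pyGet? opl c with
  | none => total   -- unreachable: 0 ≤ c < len(op_line)
  | some ch =>
    if ch ≠ '+' ∧ ch ≠ '*' then total
    else
      let lo := pvScanLo rows opl c
      let hi := pvScanHi rows opl n (c + 1)
      let nums := (PySem.List.pyRange lo hi).foldl (pvAppendCol rows) ([] : List Int)
      if nums = [] then total
      else if ch == '+' then total + nums.sum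
      else total + nums.foldl (· * ·) 1

def process_the_data_alt (theData : List String) : Int :=
  if theData = [] ∨ theData.length < 2 then 0
  else
    match PySem.List.pyGet? theData (-1) with
    | none => 0   -- unreachable: theData ≠ []
    | some opl =>
      let rows := PySem.List.slice theData none (some (-1))
      let n : Int := PySem.Str.len opl
      (PySem.List.pyRange 0 n).foldl (pvColStep rows opl n) 0

-- ===== PRECONDITION & SPEC =====
def Spec_process_the_data (theData : List String) (out : Int) : Prop := out = process_the_data_alt theData
instance (theData : List String) (out : Int) : Decidable (Spec_process_the_data theData out) := by unfold Spec_process_the_data; infer_instance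

-- ===== CLAIM (what is proved, stated in full; the proofs are below) =====
def Claim_equal_process_the_data : Prop := ∀ (theData : List String), Dom_process_the_data theData → Spec_process_the_data theData (process_the_data theData)

-- ===== LEMMAS AND PROOFS =====

-- the option view of A's operator collection
def pvOpf (opl : String) (c : Int) : Option (Int × Char) :=
  match PySem.Str.pyGet? opl c with
  | some ch => if ch == '+' || ch == '*' then some (c, ch) else none
  | none => none

theorem pv_appendOp_foldl (opl : String) (l : List Int) (acc : List (Int × Char)) :
    l.foldl (pvAppendOp opl) acc = acc ++ l.filterMap (pvOpf opl) := by
  induction l generalizing acc with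
  | nil => simp
  | cons x t ih =>
    have hx : pvAppendOp opl acc x = acc ++ (pvOpf opl x).toList := by
      unfold pvAppendOp pvOpf
      cases h : PySem.Str.pyGet? opl x with
      | none => simp
      | some ch =>
        by_cases hc : (ch == '+' || ch == '*') = true <;> simp [hc]
    rw [List.foldl_cons, List.filterMap_cons, ih, hx]
    cases h : pvOpf opl x <;> simp

theorem pv_appendCol_foldl (rows : List String) (l acc : List Int) :
    l.foldl (pvAppendCol rows) acc = acc ++ l.filterMap (pvColNum rows) := by
  induction l generalizing acc with
  | nil => simp
  | cons x t ih =>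
    simp only [List.foldl_cons, List.filterMap_cons, pvAppendCol]
    cases h : pvColNum rows x <;> simp [ih]

theorem pv_probStep_acc (rows : List String) (maxCol : Int) (boundaries : List Int)
    (acc : List Int) (p : Int × Char) :
    pvProbStep rows maxCol boundaries acc p = acc ++ pvProbStep rows maxCol boundaries [] p := by
  simp only [pvProbStep]
  split_ifs with h <;> simp

theorem pv_probStep_sum (rows : List String) (maxCol : Int) (boundaries : List Int)
    (l : List (Int × Char)) (acc : List Int) :
    (l.foldl (pvProbStep rows maxCol boundaries) acc).sum
      = acc.sum + (l.map (fun p => (pvProbStep rows maxCol boundaries [] p).sum)).sum := by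
  induction l generalizing acc with
  | nil => simp
  | cons x t ih =>
    simp only [List.foldl_cons, List.map_cons, List.sum_cons]
    rw [ih, pv_probStep_acc, List.sum_append]
    ring

theorem pv_foldl_addlike (f : Int → Int → Int) (hf : ∀ t c, f t c = t + f 0 c)
    (l : List Int) (a : Int) : l.foldl f a = a + (l.map (f 0)).sum := by
  induction l generalizing a with
  | nil => simp
  | cons x t ih =>
    simp only [List.foldl_cons, List.map_cons, List.sum_cons]
    rw [ih, hf a x]
    ring

theorem pv_colStep_acc (rows : List String) (opl : String) (n : Int) (total c : Int) :
    pvColStep rows opl n total c = total + pvColStep rows opl n 0 c := by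
  simp only [pvColStep]
  cases h : PySem.Str.pyGet? opl c with
  | none => simp
  | some ch =>
    dsimp only
    by_cases hg : ch ≠ '+' ∧ ch ≠ '*'
    · rw [if_pos hg, if_pos hg]; simp
    · rw [if_neg hg, if_neg hg]
      split_ifs with hn hc <;> simp

-- summing over a filterMap
theorem pv_sum_filterMap {α β : Type} (f : α → Option β) (g : β → Int) (l : List α) :
    ((l.filterMap f).map g).sum
      = (l.map (fun x => ((f x).map g).getD 0)).sum := by
  induction l with
  | nil => simp
  | cons x t ih =>
    simp only [List.filterMap_cons]
    cases h : f x <;> simp [h, ih]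

-- characterisation of the left edge of the problem containing column c
def pvIsLo (sep : Int → Bool) (c lo : Int) : Prop :=
  0 ≤ lo ∧ lo ≤ c ∧ (lo = 0 ∨ sep (lo - 1) = true) ∧ ∀ j, lo ≤ j → j < c → sep j = false

-- characterisation of the right edge
def pvIsHi (sep : Int → Bool) (c hi n : Int) : Prop :=
  c < hi ∧ hi ≤ n ∧ (hi = n ∨ sep hi = true) ∧ ∀ j, c < j → j < hi → sep j = false

theorem pvIsLo_unique (sep : Int → Bool) (c lo₁ lo₂ : Int)
    (h₁ : pvIsLo sep c lo₁) (h₂ : pvIsLo sep c lo₂) : lo₁ = lo₂ := by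
  obtain ⟨a1, b1, c1, d1⟩ := h₁; obtain ⟨a2, b2, c2, d2⟩ := h₂
  by_contra hne
  rcases lt_or_gt_of_ne hne with h | h
  · rcases c2 with h0 | hs
    · omega
    · have := d1 (lo₂ - 1) (by omega) (by omega); simp [this] at hs
  · rcases c1 with h0 | hs
    · omega
    · have := d2 (lo₁ - 1) (by omega) (by omega); simp [this] at hs

theorem pvIsHi_unique (sep : Int → Bool) (c hi₁ hi₂ n : Int)
    (h₁ : pvIsHi sep c hi₁ n) (h₂ : pvIsHi sep c hi₂ n) : hi₁ = hi₂ := by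
  obtain ⟨a1, b1, c1, d1⟩ := h₁; obtain ⟨a2, b2, c2, d2⟩ := h₂
  by_contra hne
  rcases lt_or_gt_of_ne hne with h | h
  · rcases c1 with h0 | hs
    · omega
    · have := d2 hi₁ (by omega) (by omega); simp [this] at hs
  · rcases c2 with h0 | hs
    · omega
    · have := d1 hi₂ (by omega) (by omega); simp [this] at hs

theorem pvScanLo_spec (rows : List String) (opl : String) (c : Int) :
    ∀ lo, 0 ≤ lo → lo ≤ c → (∀ j, lo ≤ j → j < c → pvIsSep rows opl j = false) →
      pvIsLo (pvIsSep rows opl) c (pvScanLo rows opl lo) := by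
  intro lo
  induction lo using pvScanLo.induct rows opl with
  | case1 lo h ih =>
    intro h0 hc hall
    rw [pvScanLo, dif_pos h]
    exact ih (by omega) (by omega) (fun j hj1 hj2 => by
      rcases eq_or_lt_of_le hj1 with he | hl
      · simpa [← he] using h.2
      · exact hall j (by omega) hj2)
  | case2 lo h =>
    intro h0 hc hall
    rw [pvScanLo, dif_neg h]
    refine ⟨h0, hc, ?_, hall⟩
    by_cases hz : lo = 0
    · exact Or.inl hz
    · right
      rcases Bool.eq_false_or_eq_true (pvIsSep rows opl (lo - 1)) with ht | hf
      · exact ht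
      · exact absurd ⟨by omega, hf⟩ h

theorem pvScanHi_spec (rows : List String) (opl : String) (c n : Int) :
    ∀ hi, c < hi → hi ≤ n → (∀ j, c < j → j < hi → pvIsSep rows opl j = false) →
      pvIsHi (pvIsSep rows opl) c (pvScanHi rows opl n hi) n := by
  intro hi
  induction hi using pvScanHi.induct rows opl n with
  | case1 hi h ih =>
    intro hc hn hall
    rw [pvScanHi, dif_pos h]
    exact ih (by omega) (by omega) (fun j hj1 hj2 => by
      rcases eq_or_lt_of_le (show j ≤ hi by omega) with he | hl
      · simpa [he] using h.2
      · exact hall j hj1 (by omega))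
  | case2 hi h =>
    intro hc hn hall
    rw [pvScanHi, dif_neg h]
    refine ⟨hc, hn, ?_, hall⟩
    by_cases hz : hi = n
    · exact Or.inl hz
    · right
      rcases Bool.eq_false_or_eq_true (pvIsSep rows opl hi) with ht | hf
      · exact ht
      · exact absurd ⟨by omega, hf⟩ h

-- A's boundary search over (-1) :: separators-of-[a,n) ++ [n] lands on the enclosing edges
theorem pvFindBounds_spec (sep : Int → Bool) (c n : Int) (hc0 : 0 ≤ c) (hcn : c < n) (hsc : sep c = false) :
    ∀ a prev, 0 ≤ a → -1 ≤ prev → prev < a → prev ≤ c →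
      (prev = -1 ∨ sep prev = true) →
      (∀ j, prev < j → j < a → sep j = false) →
      pvIsLo sep c (pvFindBounds c n prev (((PySem.List.pyRange a n).filter sep) ++ [n])).1 ∧
      pvIsHi sep c (pvFindBounds c n prev (((PySem.List.pyRange a n).filter sep) ++ [n])).2 n := by
  intro a
  have hterm : ∀ m : Nat, ∀ a prev, (n - a).toNat = m → 0 ≤ a → -1 ≤ prev → prev < a → prev ≤ c →
      (prev = -1 ∨ sep prev = true) →
      (∀ j, prev < j → j < a → sep j = false) →
      pvIsLo sep c (pvFindBounds c n prev (((PySem.List.pyRange a n).filter sep) ++ [n])).1 ∧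
      pvIsHi sep c (pvFindBounds c n prev (((PySem.List.pyRange a n).filter sep) ++ [n])).2 n := by
    intro m
    induction m with
    | zero =>
      intro a prev hm h0 hp1 hpa hpc hpsep hall
      have hna : n ≤ a := by omega
      rw [PySem.List.pyRange_one_eq_nil hna]
      simp only [List.filter_nil, List.nil_append, pvFindBounds]
      rw [if_pos hcn]
      have hpc' : prev < c := by
        rcases hpsep with h | h
        · omega
        · rcases eq_or_lt_of_le hpc with he | hl
          · rw [he] at h; simp [hsc] at h
          · exact hl
      have h3 : prev + 1 = 0 ∨ sep (prev + 1 - 1) = true := by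
        rcases hpsep with h | h
        · left; omega
        · right; simpa [show prev + 1 - 1 = prev by omega] using h
      constructor
      · exact ⟨by omega, by omega, h3, fun j hj1 hj2 => hall j (by omega) (by omega)⟩
      · exact ⟨hcn, le_refl n, Or.inl rfl, fun j hj1 hj2 => hall j (by omega) (by omega)⟩
    | succ m ih =>
      intro a prev hm h0 hp1 hpa hpc hpsep hall
      by_cases hna : n ≤ a
      · -- same as base case
        rw [PySem.List.pyRange_one_eq_nil hna]
        simp only [List.filter_nil, List.nil_append, pvFindBounds]
        rw [if_pos hcn]
        have hpc' : prev < c := by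
          rcases hpsep with h | h
          · omega
          · rcases eq_or_lt_of_le hpc with he | hl
            · rw [he] at h; simp [hsc] at h
            · exact hl
        have h3 : prev + 1 = 0 ∨ sep (prev + 1 - 1) = true := by
          rcases hpsep with h | h
          · left; omega
          · right; simpa [show prev + 1 - 1 = prev by omega] using h
        constructor
        · exact ⟨by omega, by omega, h3, fun j hj1 hj2 => hall j (by omega) (by omega)⟩
        · exact ⟨hcn, le_refl n, Or.inl rfl, fun j hj1 hj2 => hall j (by omega) (by omega)⟩
      · have han : a < n := by omega
        rw [PySem.List.pyRange_one_cons han, List.filter_cons]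
        by_cases hsa : sep a = true
        · simp only [hsa, if_pos, List.cons_append, pvFindBounds]
          by_cases hca : c < a
          · rw [if_pos hca]
            have hpc' : prev < c := by
              rcases hpsep with h | h
              · omega
              · rcases eq_or_lt_of_le hpc with he | hl
                · rw [he] at h; simp [hsc] at h
                · exact hl
            have h3 : prev + 1 = 0 ∨ sep (prev + 1 - 1) = true := by
              rcases hpsep with h | h
              · left; omega
              · right; simpa [show prev + 1 - 1 = prev by omega] using h
            constructor
            · exact ⟨by omega, by omega, h3, fun j hj1 hj2 => hall j (by omega) (by omega)⟩
            · exact ⟨hca, by omega, Or.inr hsa, fun j hj1 hj2 => hall j (by omega) (by omega)⟩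
          · rw [if_neg hca]
            have hac : a < c := by
              rcases lt_or_eq_of_le (not_lt.mp hca) with h | h
              · exact h
              · rw [h] at hsa; simp [hsc] at hsa
            exact ih (a + 1) a (by omega) (by omega) (by omega) (by omega) (by omega)
              (Or.inr hsa) (fun j hj1 hj2 => by omega)
        · have hsa' : sep a = false := by simpa using hsa
          simp only [hsa', Bool.false_eq_true, if_false]
          exact ih (a + 1) prev (by omega) (by omega) hp1 (by omega) hpc hpsep
            (fun j hj1 hj2 => by
              rcases eq_or_lt_of_le (show j ≤ a by omega) with he | hl
              · rwa [he]
              · exact hall j hj1 (by omega))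
  intro prev h0 hp1 hpa hpc hpsep hall
  exact hterm (n - a).toNat a prev rfl h0 hp1 hpa hpc hpsep hall

-- the filtered range of separator columns is already sorted
theorem pv_sorted_sepCols (rows : List String) (opl : String) (n : Int) :
    PySem.List.sorted ((PySem.List.pyRange 0 n).filter (fun c => pvIsSep rows opl c)) (fun x => x)
      = (PySem.List.pyRange 0 n).filter (fun c => pvIsSep rows opl c) := by
  exact PySem.List.sorted_eq_of_perm_of_pairwise_lt _ _ _ (List.Perm.refl _)
    ((PySem.List.pairwise_lt_pyRange_one 0 n).filter _)

-- per-operator agreement: A's boundary lookup + right-to-left number read equals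
-- B's local scans + left-to-right read, for any column c of the operator line
theorem pv_op_agree (rows : List String) (opl : String) (n c : Int)
    (h0 : 0 ≤ c) (hcn : c < n) :
    ((pvOpf opl c).map (fun p => (pvProbStep rows n
         ((-1) :: ((PySem.List.pyRange 0 n).filter (fun x => pvIsSep rows opl x) ++ [n])) [] p).sum)).getD 0
    = pvColStep rows opl n 0 c := by
  cases hch : PySem.Str.pyGet? opl c with
  | none => simp only [pvOpf, pvColStep, hch, Option.map_none, Option.getD_none]
  | some ch =>
    by_cases hop' : (ch == '+' || ch == '*') = true
    · have hop : ch = '+' ∨ ch = '*' := by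
        rcases Bool.or_eq_true_iff.mp hop' with h | h
        · exact Or.inl (by simpa using h)
        · exact Or.inr (by simpa using h)
      simp only [pvOpf, hch, hop', if_true, Option.map_some, Option.getD_some]
      have hsc : pvIsSep rows opl c = false := by
        have h2 : (match PySem.Str.pyGet? opl c with
            | some ch => ch == ' ' | none => false) = false := by
          rw [hch]; rcases hop with h | h <;> simp [h]
        unfold pvIsSep
        rw [h2, Bool.and_false]
      have hfb := pvFindBounds_spec (pvIsSep rows opl) c n h0 hcn hsc 0 (-1)
        (le_refl 0) (by omega) (by omega) (by omega) (Or.inl rfl) (fun j hj1 hj2 => by omega)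
      have hlo := pvScanLo_spec rows opl c c h0 (le_refl c) (fun j hj1 hj2 => by omega)
      have hhi := pvScanHi_spec rows opl c n (c + 1) (by omega) (by omega) (fun j hj1 hj2 => by omega)
      set se := pvFindBounds c n (-1)
        (((PySem.List.pyRange 0 n).filter (fun x => pvIsSep rows opl x)) ++ [n]) with hse
      have hlo' : se.1 = pvScanLo rows opl c := pvIsLo_unique _ c _ _ hfb.1 hlo
      have hhi' : se.2 = pvScanHi rows opl n (c + 1) := pvIsHi_unique _ c _ _ n hfb.2 hhi
      have hguard : ¬ (ch ≠ '+' ∧ ch ≠ '*') := by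
        rcases hop with h | h <;> simp [h]
      simp only [pvProbStep, pvColStep, hch, hguard, if_false, ← hse]
      rw [List.reverse_reverse, PySem.List.pyRange_neg_one_eq_reverse]
      have h1 : se.1 - 1 + 1 = se.1 := by omega
      have h2 : se.2 - 1 + 1 = se.2 := by omega
      rw [h1, h2, hlo', hhi']
      rw [pv_appendCol_foldl, pv_appendCol_foldl, List.filterMap_reverse]
      simp only [List.nil_append]
      set ns := (PySem.List.pyRange (pvScanLo rows opl c) (pvScanHi rows opl n (c + 1))).filterMap
        (pvColNum rows) with hns
      by_cases hn : ns = []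
      · simp [hn]
      · have hn' : ns.reverse ≠ [] := by simpa using hn
        rw [if_neg hn', if_neg hn]
        rcases hop with h | h
        · simp [h, List.sum_reverse]
        · simp only [h, show ('*' == '+') = false by decide, Bool.false_eq_true, if_false,
            show ('*' == '*') = true by decide, if_true, List.sum_cons, List.sum_nil]
          rw [← List.prod_eq_foldl, ← List.prod_eq_foldl, List.prod_reverse]
          simp
    · have hguard : (ch ≠ '+' ∧ ch ≠ '*') := by
        constructor <;> intro he <;> rw [he] at hop' <;> simp at hop'
      simp only [pvOpf, pvColStep, hch]
      rw [if_neg hop', if_pos hguard]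
      simp

-- ===== VERDICT (by name: the statement is the Claim_ definition above) =====
theorem process_the_data_spec : Claim_equal_process_the_data := by
  intro theData _
  unfold Spec_process_the_data process_the_data process_the_data_alt
  by_cases hshort : theData = [] ∨ theData.length < 2
  · rw [if_pos hshort, if_pos hshort]
  · rw [if_neg hshort, if_neg hshort]
    cases hop : PySem.List.pyGet? theData (-1) with
    | none => rfl
    | some opl =>
      simp only
      set rows := PySem.List.slice theData none (some (-1)) with hrows
      set n := PySem.Str.len opl with hn
      rw [pv_sorted_sepCols, pv_appendOp_foldl, List.nil_append, pv_probStep_sum,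
        List.sum_nil, List.map_reverse, List.sum_reverse, pv_sum_filterMap,
        pv_foldl_addlike (pvColStep rows opl n) (pv_colStep_acc rows opl n)]
      simp only [zero_add]
      refine congrArg List.sum (List.map_congr_left (fun c hc => ?_))
      have hmem := PySem.List.mem_pyRange_one.mp hc
      exact pv_op_agree rows opl n c hmem.1 hmem.2
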